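-- pv_equiv track=rewrite | github.com/wazzamatazz/varda | webapps/varda/misc.py | list_of_dicts_has_duplicate_values
-- ===== SOURCE A (Python) =====
-- from collections import Counter
--
-- def list_of_dicts_has_duplicate_values(searchable_list, key_name):
--     """
--     https://www.robjwells.com/2015/08/python-counter-gotcha-with-max/
--     """
--     c = Counter()
--     for item in searchable_list:
--         if key_name in item:
--             c[item[key_name]] += 1
--
--     highest_occurrence = c.most_common(1)[0][1] if c else None
--     if highest_occurrence is not None and highest_occurrence > 1:
--         return True
--     return False
-- ===== SOURCE B (Python) =====
-- def list_of_dicts_has_duplicate_values(searchable_list, key_name):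
--     seen = set()
--     for item in searchable_list:
--         if key_name in item:
--             value = item[key_name]
--             if value in seen:
--                 return True
--             seen.add(value)
--     return False
-- ===== Notes on version B (the rewrite author's own statement) =====
-- stated objective: simpler
-- what changed: Replaces the Counter frequency table plus a post-loop most_common(1) sort with a seen-set membership check that returns True early on the first repeated value.
import Mathlib
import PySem

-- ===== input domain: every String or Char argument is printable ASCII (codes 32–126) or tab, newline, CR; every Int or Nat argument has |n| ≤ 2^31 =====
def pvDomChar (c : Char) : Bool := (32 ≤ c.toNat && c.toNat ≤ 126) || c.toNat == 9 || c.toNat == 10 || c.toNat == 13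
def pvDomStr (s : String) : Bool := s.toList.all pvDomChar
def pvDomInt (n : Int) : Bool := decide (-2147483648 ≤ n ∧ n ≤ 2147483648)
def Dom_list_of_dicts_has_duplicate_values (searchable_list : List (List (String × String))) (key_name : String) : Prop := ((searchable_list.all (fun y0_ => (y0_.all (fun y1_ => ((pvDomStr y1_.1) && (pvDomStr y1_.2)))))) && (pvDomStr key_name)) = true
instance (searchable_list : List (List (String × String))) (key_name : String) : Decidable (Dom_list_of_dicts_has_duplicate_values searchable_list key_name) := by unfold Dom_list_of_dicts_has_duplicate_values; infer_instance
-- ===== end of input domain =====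

-- B replaces the Counter + most_common(1) query with a seen-set and an early return on the first repeated value (simpler).


-- ===== PORT A =====
def list_of_dicts_has_duplicate_values (searchable_list : List (List (String × String))) (key_name : String) : Bool :=
  -- c = Counter(); for item in searchable_list: if key_name in item: c[item[key_name]] += 1
  let c : PySem.Dict String Int :=
    searchable_list.foldl
      (fun c item =>
        if (PySem.Dict.mk item).contains key_name then
          c.modify (((PySem.Dict.mk item).get? key_name).getD "") 0 (· + 1)
        else c)
      PySem.Dict.empty
  -- highest_occurrence = c.most_common(1)[0][1] if c else None
  -- (most_common = items sorted by count descending, stable; the [0] access is guarded by 'if c')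
  let highest_occurrence : Option Int :=
    if c.size ≠ 0 then (PySem.List.sorted c.items (fun p => p.2) true).head?.map (·.2)
    else none
  match highest_occurrence with
  | some h => decide (h > 1)
  | none => false

-- ===== PORT B =====
def pvAltGo (key_name : String) (searchable_list : List (List (String × String))) (seen : PySem.Set String) : Bool :=
  match searchable_list with
  | [] => false
  | item :: rest =>
    match (PySem.Dict.mk item).get? key_name with
    | some value => if PySem.Set.contains seen value then true else pvAltGo key_name rest (PySem.Set.add seen value)
    | none => pvAltGo key_name rest seen

def list_of_dicts_has_duplicate_values_alt (searchable_list : List (List (String × String))) (key_name : String) : Bool :=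
  pvAltGo key_name searchable_list PySem.Set.empty

-- ===== PRECONDITION & SPEC =====
def Spec_list_of_dicts_has_duplicate_values (searchable_list : List (List (String × String))) (key_name : String) (out : Bool) : Prop := out = list_of_dicts_has_duplicate_values_alt searchable_list key_name
instance (searchable_list : List (List (String × String))) (key_name : String) (out : Bool) : Decidable (Spec_list_of_dicts_has_duplicate_values searchable_list key_name out) := by unfold Spec_list_of_dicts_has_duplicate_values; infer_instance

-- ===== CLAIM (what is proved, stated in full; the proofs are below) =====
def Claim_equal_list_of_dicts_has_duplicate_values : Prop := ∀ (searchable_list : List (List (String × String))) (key_name : String), Dom_list_of_dicts_has_duplicate_values searchable_list key_name → Spec_list_of_dicts_has_duplicate_values searchable_list key_name (list_of_dicts_has_duplicate_values searchable_list key_name)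

-- ===== LEMMAS AND PROOFS =====

-- the values item[key_name] selected by both loops, in order
def pvVals (searchable_list : List (List (String × String))) (key_name : String) : List String :=
  searchable_list.filterMap (fun item => (PySem.Dict.mk item).get? key_name)

-- A's counting loop is Counter(pvVals …)
lemma pvA_counter (l : List (List (String × String))) (k : String) (c0 : PySem.Dict String Int) :
    l.foldl
      (fun c item =>
        if (PySem.Dict.mk item).contains k then
          c.modify (((PySem.Dict.mk item).get? k).getD "") 0 (· + 1)
        else c)
      c0
    = List.foldl (fun d v => d.modify v 0 (· + 1)) c0 (pvVals l k) := by
  induction l generalizing c0 with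
  | nil => rfl
  | cons item rest ih =>
    simp only [List.foldl_cons, pvVals, List.filterMap_cons]
    rcases h : (PySem.Dict.mk item).get? k with _ | v
    · have hc : (PySem.Dict.mk item).contains k = false := by
        rw [PySem.Dict.contains_eq_isSome_get?, h]; rfl
      simp only [hc, Bool.false_eq_true, if_false]
      exact ih c0
    · have hc : (PySem.Dict.mk item).contains k = true := by
        rw [PySem.Dict.contains_eq_isSome_get?, h]; rfl
      simp only [hc, if_true, Option.getD_some, List.foldl_cons]
      exact ih _

-- B's loop returns true iff some selected value is already in `seen` or a value repeats
lemma pvB_go (k : String) (l : List (List (String × String))) (seen : PySem.Set String) :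
    pvAltGo k l seen = true ↔ ((∃ v ∈ pvVals l k, v ∈ seen) ∨ ¬ (pvVals l k).Nodup) := by
  induction l generalizing seen with
  | nil => simp [pvAltGo, pvVals]
  | cons item rest ih =>
    rcases h : (PySem.Dict.mk item).get? k with _ | v
    · simpa [pvAltGo, pvVals, h] using ih seen
    · by_cases hv : v ∈ seen
      · have hvc : PySem.Set.contains seen v = true := by
          simpa [PySem.Set.contains] using hv
        simp only [pvAltGo, pvVals, List.filterMap_cons, h, hvc, if_true]
        constructor
        · intro _
          exact Or.inl ⟨v, by simp, hv⟩
        · intro _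
          trivial
      · have hvc : ¬ PySem.Set.contains seen v = true := by
          simpa [PySem.Set.contains] using hv
        have hadd : PySem.Set.add seen v = seen ++ [v] := by
          simp [PySem.Set.add, PySem.Set.contains] at hvc ⊢
          intro hmem; exact absurd hmem hvc
        have hstep : pvAltGo k (item :: rest) seen = pvAltGo k rest (seen ++ [v]) := by
          simp [pvAltGo, h, hv]
        rw [hstep, ih]
        simp only [pvVals, List.filterMap_cons, h, List.nodup_cons, List.mem_cons,
          List.mem_append, List.not_mem_nil, or_false]
        constructor
        · rintro (⟨w, hw, hws | rfl⟩ | hnd)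
          · exact Or.inl ⟨w, Or.inr hw, hws⟩
          · exact Or.inr (fun ⟨hnv, _⟩ => hnv hw)
          · exact Or.inr (fun ⟨_, hnd'⟩ => hnd hnd')
        · rintro (⟨w, rfl | hw, hws⟩ | hnd)
          · exact absurd hws hv
          · exact Or.inl ⟨w, hw, Or.inl hws⟩
          · by_cases hmem : v ∈ pvVals rest k
            · exact Or.inl ⟨v, hmem, Or.inr rfl⟩
            · exact Or.inr (fun hnd' => hnd ⟨fun hc => hmem (by simpa [pvVals] using hc), hnd'⟩)

-- B decides "pvVals has a repeated value"
lemma pvB_spec (l : List (List (String × String))) (k : String) :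
    list_of_dicts_has_duplicate_values_alt l k = !decide (pvVals l k).Nodup := by
  apply Bool.eq_iff_iff.mpr
  rw [list_of_dicts_has_duplicate_values_alt, pvB_go]
  simp [PySem.Set.empty]

-- A decides the same
lemma pvA_spec (l : List (List (String × String))) (k : String) :
    list_of_dicts_has_duplicate_values l k = !decide (pvVals l k).Nodup := by
  rw [list_of_dicts_has_duplicate_values]
  simp only [pvA_counter, ← PySem.Dict.counter_eq_foldl]
  by_cases hnil : pvVals l k = []
  · simp [hnil, PySem.Dict.counter, PySem.Dict.size, PySem.Dict.empty]
  · have hof : PySem.Set.ofList (pvVals l k) ≠ [] := by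
      intro h0
      obtain ⟨x, hx⟩ := List.exists_mem_of_ne_nil _ hnil
      have := (PySem.Set.mem_ofList (pvVals l k) x).2 hx
      simp [h0] at this
    have hsz : (PySem.Dict.counter (pvVals l k)).size ≠ 0 := by
      simp [PySem.Dict.size, PySem.Dict.items_counter, hof]
    rcases hhd : PySem.List.sorted (PySem.Dict.counter (pvVals l k)).items (fun p => p.2) true
      with _ | ⟨m, t⟩
    · exfalso
      have hperm := PySem.List.sorted_perm (PySem.Dict.counter (pvVals l k)).items (fun p => p.2) true
      rw [hhd] at hperm
      have hit : (PySem.Dict.counter (pvVals l k)).items = [] := hperm.symm.eq_nil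
      simp [PySem.Dict.size, hit] at hsz
    · have hmax : ∀ y ∈ (PySem.Dict.counter (pvVals l k)).items, y.2 ≤ m.2 :=
        PySem.List.key_head_sorted_rev_ge _ _ hhd
      have hmem : m ∈ (PySem.Dict.counter (pvVals l k)).items := by
        have hperm := PySem.List.sorted_perm (PySem.Dict.counter (pvVals l k)).items (fun p => p.2) true
        rw [hhd] at hperm
        exact hperm.mem_iff.1 List.mem_cons_self
      rw [PySem.Dict.items_counter] at hmem
      obtain ⟨v, hv, rfl⟩ := List.mem_map.1 hmem
      rw [if_pos hsz]
      simp only [List.head?, Option.map_some]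
      by_cases hnd : (pvVals l k).Nodup
      · have hle : ((pvVals l k).count v : Int) ≤ 1 := by
          exact_mod_cast List.nodup_iff_count_le_one.1 hnd v
        simp only [hnd, decide_true, Bool.not_true]
        simpa using show ¬ (1 : Int) < (pvVals l k).count v by omega
      · obtain ⟨a, ha⟩ : ∃ a : String, 2 ≤ (pvVals l k).count a := by
          by_contra hcon
          push Not at hcon
          exact hnd (List.nodup_iff_count_le_one.2 (fun a => by have := hcon a; omega))
        have hamem : a ∈ pvVals l k := List.count_pos_iff.1 (by omega)
        have hbound : ((pvVals l k).count a : Int) ≤ ((pvVals l k).count v : Int) := by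
          have := hmax (a, ((pvVals l k).count a : Int))
            (by
              rw [PySem.Dict.items_counter]
              exact List.mem_map.2 ⟨a, (PySem.Set.mem_ofList _ _).2 hamem, rfl⟩)
          simpa using this
        have hgt : (1 : Int) < ((pvVals l k).count v : Int) := by
          have h2 : (2 : Int) ≤ ((pvVals l k).count a : Int) := by exact_mod_cast ha
          omega
        simp only [hnd, decide_false, Bool.not_false]
        simpa using hgt

-- ===== VERDICT (by name: the statement is the Claim_ definition above) =====
theorem list_of_dicts_has_duplicate_values_spec : Claim_equal_list_of_dicts_has_duplicate_values := by
  intro l k _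
  unfold Spec_list_of_dicts_has_duplicate_values
  rw [pvA_spec, pvB_spec]
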